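-- pv_equiv track=rewrite | github.com/SYMAIN/Competitive-Programming | Code Jam/2021/Reversort Engineering.py | reversort
-- ===== SOURCE A (Python) =====
-- def reverse(s,i,j):
--     newList = []
--     for k in range(0,i):
--         newList.append(s[k])
--     for k in range(j,i-1,-1):
--         newList.append(s[k])
--     for k in range(j+1,len(s)):
--         newList.append(s[k])
--     return newList
--
-- def reversort(s):
--     cnt = 0
--     for i in range(0, len(s)-1):
--         j = 0
--         MIN = 1000000000000
--         for k in range(i, len(s)):
--             if (s[k] < MIN):
--                 MIN = s[k]
--                 j = k
--         s = reverse(s,i,j)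
--         cnt += j-i+1
--     return cnt
-- ===== SOURCE B (Python) =====
-- def reversort(s):
--     rem = list(s)
--     total = 0
--     while len(rem) > 1:
--         j = rem.index(min(rem))
--         total += j + 1
--         rem = rem[:j][::-1] + rem[j+1:]
--     return total
-- ===== Notes on version B (the rewrite author's own statement) =====
-- stated objective: simpler
-- what changed: B replaces A's index-arithmetic loops (hand-built reverse via three append loops, inner scan with a 10^12 sentinel) with a shrinking-list simulation: while more than one element remains, locate the first minimum with min/index, add j+1, and rebuild the remainder by slicing (reversed prefix before the minimum plus the untouched tail), so no absolute indices or sentinel are needed.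
import Mathlib
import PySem

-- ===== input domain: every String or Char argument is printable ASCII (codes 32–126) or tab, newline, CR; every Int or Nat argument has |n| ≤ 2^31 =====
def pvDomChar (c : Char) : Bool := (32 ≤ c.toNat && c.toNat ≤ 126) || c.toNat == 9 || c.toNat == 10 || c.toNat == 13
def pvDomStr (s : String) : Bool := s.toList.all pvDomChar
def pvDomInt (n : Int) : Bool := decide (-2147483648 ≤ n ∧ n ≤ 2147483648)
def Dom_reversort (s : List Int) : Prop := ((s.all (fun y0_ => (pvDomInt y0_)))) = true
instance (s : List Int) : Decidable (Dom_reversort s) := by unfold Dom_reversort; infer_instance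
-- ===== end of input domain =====

-- B replaces A's index-arithmetic simulation (hand-built reverse, sentinel scan) by a
-- shrinking-list simulation using min/index and slices; equivalence of the return values is proved on Dom.

-- B replaces A's index-arithmetic simulation (hand-built reverse and sentinel scan) by a
-- shrinking-list simulation using min/index and slices; the return values are proved equal on Dom.

-- ===== PORT A =====
-- helper 'reverse(s, i, j)' of A: three explicit append loops
def pyReverse (s : List Int) (i j : Int) : List Int :=
  let n1 := (PySem.List.pyRange 0 i 1).foldl (fun acc k => acc ++ [PySem.List.pyGetD s k 0]) ([] : List Int)
  let n2 := (PySem.List.pyRange j (i - 1) (-1)).foldl (fun acc k => acc ++ [PySem.List.pyGetD s k 0]) n1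
  (PySem.List.pyRange (j + 1) (PySem.List.len s) 1).foldl (fun acc k => acc ++ [PySem.List.pyGetD s k 0]) n2

-- body of A's outer 'for i in range(0, len(s)-1)' loop: sentinel scan for the min, then reverse
def reversortStep (st : List Int × Int) (i : Int) : List Int × Int :=
  let mj := (PySem.List.pyRange i (PySem.List.len st.1) 1).foldl
    (fun (mj : Int × Int) k =>
      if PySem.List.pyGetD st.1 k 0 < mj.1 then (PySem.List.pyGetD st.1 k 0, k) else mj)
    ((1000000000000 : Int), (0 : Int))
  (pyReverse st.1 i mj.2, st.2 + (mj.2 - i + 1))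

def reversort (s : List Int) : Int :=
  ((PySem.List.pyRange 0 (PySem.List.len s - 1) 1).foldl reversortStep (s, (0 : Int))).2

-- ===== PORT B =====
-- while len(rem) > 1: j = rem.index(min(rem)); total += j + 1; rem = rem[:j][::-1] + rem[j+1:]
def reversortAltGo (rem : List Int) (total : Int) : Int :=
  if _h : 1 < rem.length then
    match PySem.List.min? rem (fun x => x) with
    | none => total
    | some m =>
      match hj : PySem.List.index? rem m with
      | none => total
      | some j =>
        reversortAltGo ((rem.take j).reverse ++ rem.drop (j + 1)) (total + ((j : Int) + 1))
  else total
termination_by rem.length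
decreasing_by
  obtain ⟨hk, -, -⟩ := PySem.List.getElem_of_index?_eq_some hj
  simp only [List.length_append, List.length_reverse, List.length_take, List.length_drop]
  omega

def reversort_alt (s : List Int) : Int := reversortAltGo s 0

-- ===== PRECONDITION & SPEC =====
def Spec_reversort (s : List Int) (out : Int) : Prop := out = reversort_alt s
instance (s : List Int) (out : Int) : Decidable (Spec_reversort s out) := by unfold Spec_reversort; infer_instance

-- ===== CLAIM (what is proved, stated in full; the proofs are below) =====
def Claim_equal_reversort : Prop := ∀ (s : List Int), Dom_reversort s → Spec_reversort s (reversort s)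

-- ===== LEMMAS AND PROOFS =====

-- pure form of A's inner sentinel scan
def selAux : List Int → Int → Int × Int → Int × Int
  | [], _, acc => acc
  | x :: r, i, acc => selAux r (i + 1) (if x < acc.1 then (x, i) else acc)

theorem foldl_min_cons (r : List Int) : ∀ (x y : Int),
    List.foldl min (min x y) r = min x (List.foldl min y r) := by
  induction r with
  | nil => simp
  | cons z r ih =>
    intro x y
    simp only [List.foldl_cons]
    rw [min_assoc, ih]

theorem inner_fold_eq (s : List Int) : ∀ (t : List Int) (a : Nat), s.drop a = t → ∀ (acc : Int × Int),
    (PySem.List.pyRange (a : Int) (PySem.List.len s) 1).foldl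
      (fun (mj : Int × Int) k =>
        if PySem.List.pyGetD s k 0 < mj.1 then (PySem.List.pyGetD s k 0, k) else mj) acc
    = selAux t (a : Int) acc := by
  intro t
  induction t with
  | nil =>
    intro a ha acc
    have hlen : s.length ≤ a := by
      by_contra h
      have := List.drop_eq_nil_iff.mp ha
      omega
    rw [PySem.List.pyRange_one_eq_nil (by simp [PySem.List.len_eq]; exact_mod_cast hlen)]
    rfl
  | cons x r ih =>
    intro a ha acc
    have hlt : a < s.length := by
      by_contra h
      rw [List.drop_eq_nil_iff.mpr (by omega)] at ha
      simp at ha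
    have hx : s[a] = x := by
      have := List.drop_eq_getElem_cons hlt
      rw [this] at ha
      exact (List.cons.injEq _ _ _ _ ▸ ha).1
    have hr : s.drop (a + 1) = r := by
      have := List.drop_eq_getElem_cons hlt
      rw [this] at ha
      exact (List.cons.injEq _ _ _ _ ▸ ha).2
    rw [PySem.List.pyRange_one_cons (by simp [PySem.List.len_eq]; exact_mod_cast hlt)]
    simp only [List.foldl_cons]
    have hget : PySem.List.pyGetD s (a : Int) 0 = x := by
      rw [PySem.List.pyGetD_natCast]
      rw [List.getD_eq_getElem s 0 hlt]
      exact hx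
    rw [hget]
    have := ih (a + 1) hr (if x < acc.1 then (x, (a : Int)) else acc)
    push_cast at this ⊢
    rw [this]
    rfl

theorem selAux_general : ∀ (t : List Int) (i M j0 : Int),
    selAux t i (M, j0) =
      match PySem.List.min? t (fun x => x) with
      | none => (M, j0)
      | some m =>
        if m < M then (m, i + (((PySem.List.index? t m).getD 0 : Nat) : Int)) else (M, j0) := by
  intro t
  induction t with
  | nil => intro i M j0; rfl
  | cons x r ih =>
    intro i M j0
    rw [PySem.List.min?_id_cons]
    show selAux r (i + 1) (if x < M then (x, i) else (M, j0)) = _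
    rcases hr : PySem.List.min? r (fun x => x) with _ | mr
    · -- r = []
      have hrnil : r = [] := (PySem.List.min?_eq_none_iff r _).mp hr
      subst hrnil
      simp only [List.foldl_nil]
      by_cases hxM : x < M
      · simp [selAux, hxM]
      · simp [selAux, hxM]
    · -- r nonempty with min mr
      have hmr_mem : mr ∈ r := PySem.List.min?_mem hr
      obtain ⟨k, hk⟩ : ∃ k, PySem.List.index? r mr = some k := by
        have := (PySem.List.index?_isSome_iff r mr).mpr hmr_mem
        exact Option.isSome_iff_exists.mp this
      -- value of the cons min
      have hfold : List.foldl min x r = min x mr := by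
        rcases r with _ | ⟨y, r'⟩
        · simp at hmr_mem
        · have h1 : PySem.List.min? (y :: r') (fun z => z) = some (List.foldl min y r') :=
            PySem.List.min?_id_cons y r'
          rw [hr] at h1
          have h2 : mr = List.foldl min y r' := Option.some.inj h1
          rw [h2]
          simp only [List.foldl_cons]
          exact foldl_min_cons r' x y
      rw [hfold]
      have hk' : List.idxOf? mr r = some k := by
        rw [PySem.List.index?_eq_idxOf?] at hk; exact hk
      have ihx := ih (i + 1)
      by_cases hxM : x < M
      · rw [if_pos hxM, ihx x i, hr]
        by_cases hmx : mr < x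
        · have hne : x ≠ mr := by omega
          have hmin : min x mr = mr := by omega
          have hminM : mr < M := by omega
          have h4 := PySem.List.index?_cons_of_ne r hne
          rw [PySem.List.index?_eq_idxOf?, PySem.List.index?_eq_idxOf?] at h4
          rw [hmin]
          simp [h4, hk', hmx, hminM]
          omega
        · have hmin : min x mr = x := by omega
          have h4 := PySem.List.index?_cons_self x r
          rw [PySem.List.index?_eq_idxOf?] at h4
          rw [hmin]
          simp [h4, hmx, hxM]
      · rw [if_neg hxM, ihx M j0, hr]
        by_cases hmM : mr < M
        · have hne : x ≠ mr := by omega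
          have hmin : min x mr = mr := by omega
          have h4 := PySem.List.index?_cons_of_ne r hne
          rw [PySem.List.index?_eq_idxOf?, PySem.List.index?_eq_idxOf?] at h4
          rw [hmin]
          simp [h4, hk', hmM]
          omega
        · have h3 : ¬ min x mr < M := by omega
          simp [hmM, h3]

theorem map_getD_range (s : List Int) : ∀ (n a b : Nat), b - a = n → b ≤ s.length →
    (PySem.List.pyRange (a : Int) (b : Int) 1).map (fun k => PySem.List.pyGetD s k 0)
      = (s.drop a).take (b - a) := by
  intro n
  induction n with
  | zero =>
    intro a b hn hb
    rw [PySem.List.pyRange_one_eq_nil (by omega)]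
    simp [hn]
  | succ n ih =>
    intro a b hn hb
    have hab : a < b := by omega
    have ha : a < s.length := by omega
    rw [PySem.List.pyRange_one_cons (by exact_mod_cast hab)]
    simp only [List.map_cons]
    have h1 : ((a : Int) + 1) = ((a + 1 : Nat) : Int) := by push_cast; ring
    rw [h1, ih (a+1) b (by omega) hb]
    rw [PySem.List.pyGetD_natCast, List.getD_eq_getElem s 0 ha]
    rw [List.drop_eq_getElem_cons ha]
    have h2 : b - a = (b - (a+1)) + 1 := by omega
    rw [h2, List.take_succ_cons]

theorem pyReverse_eq (s : List Int) (i j : Nat) (hij : i ≤ j) (hj : j < s.length) :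
    pyReverse s (i : Int) (j : Int)
      = s.take i ++ ((s.drop i).take (j - i + 1)).reverse ++ s.drop (j + 1) := by
  unfold pyReverse
  rw [PySem.List.foldl_append_singleton_eq_map, PySem.List.foldl_append_singleton_eq_map,
      PySem.List.foldl_append_singleton_eq_map]
  have h0 : (0 : Int) = ((0 : Nat) : Int) := by norm_num
  have hrev : PySem.List.pyRange (j : Int) ((i : Int) - 1) (-1)
      = (PySem.List.pyRange (i : Int) ((j : Int) + 1) 1).reverse := by
    rw [PySem.List.pyRange_neg_one_eq_reverse]
    congr 2
    ring
  rw [hrev]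
  rw [List.map_reverse]
  have m1 : (PySem.List.pyRange ((0:Nat) : Int) ((i:Nat) : Int) 1).map (fun k => PySem.List.pyGetD s k 0)
      = (s.drop 0).take (i - 0) := map_getD_range s (i - 0) 0 i rfl (by omega)
  have m2 : (PySem.List.pyRange ((i:Nat) : Int) (((j+1:Nat)) : Int) 1).map (fun k => PySem.List.pyGetD s k 0)
      = (s.drop i).take ((j+1) - i) := map_getD_range s ((j+1) - i) i (j+1) rfl (by omega)
  have m3 : (PySem.List.pyRange (((j+1:Nat)) : Int) (((s.length : Nat)) : Int) 1).map (fun k => PySem.List.pyGetD s k 0)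
      = (s.drop (j+1)).take (s.length - (j+1)) := map_getD_range s (s.length - (j+1)) (j+1) s.length rfl (by omega)
  simp only [Nat.sub_zero, List.drop_zero] at m1
  rw [h0] at *
  have hc1 : ((j : Int) + 1) = (((j+1 : Nat)) : Int) := by push_cast; ring
  rw [hc1] at *
  rw [PySem.List.len_eq] at *
  rw [m1, m2, m3]
  have : (j + 1) - i = j - i + 1 := by omega
  rw [this]
  have : (s.drop (j+1)).take (s.length - (j+1)) = s.drop (j+1) := by
    apply List.take_of_length_le
    simp
  rw [this]
  simp

theorem loop_eq : ∀ (d : Nat) (s : List Int) (i : Nat) (cnt : Int),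
    s.length = i + d + 1 → (∀ x ∈ s, x < 1000000000000) →
    ((PySem.List.pyRange (i : Int) (PySem.List.len s - 1) 1).foldl reversortStep (s, cnt)).2
      = reversortAltGo (s.drop i) cnt := by
  intro d
  induction d with
  | zero =>
    intro s i cnt hlen hb
    rw [PySem.List.pyRange_one_eq_nil (by simp [PySem.List.len_eq]; omega)]
    rw [reversortAltGo]
    simp [hlen]
  | succ d ih =>
    intro s i cnt hlen hb
    have hi_lt : (i : Int) < PySem.List.len s - 1 := by simp [PySem.List.len_eq]; omega
    rw [PySem.List.pyRange_one_cons hi_lt]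
    simp only [List.foldl_cons]
    -- analyse one step
    set rem := s.drop i with hrem
    have hremlen : rem.length = d + 2 := by simp [hrem]; omega
    obtain ⟨x, r, hxr⟩ : ∃ x r, rem = x :: r := by
      cases hc : rem with
      | nil => rw [hc] at hremlen; simp at hremlen
      | cons x r => exact ⟨x, r, rfl⟩
    have hmin : PySem.List.min? rem (fun y => y) = some (List.foldl min x r) := by
      rw [hxr]; exact PySem.List.min?_id_cons x r
    set m := List.foldl min x r with hm
    have hm_mem : m ∈ rem := PySem.List.min?_mem hmin
    obtain ⟨jr, hjr⟩ : ∃ jr, PySem.List.index? rem m = some jr :=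
      Option.isSome_iff_exists.mp ((PySem.List.index?_isSome_iff rem m).mpr hm_mem)
    have hjr_lt : jr < rem.length := by
      obtain ⟨hk, -, -⟩ := PySem.List.getElem_of_index?_eq_some hjr
      exact hk
    have hmB : m < 1000000000000 := hb m (List.mem_of_mem_drop (hrem ▸ hm_mem))
    -- the inner scan returns (m, i + jr)
    have hscan : (PySem.List.pyRange (i : Int) (PySem.List.len s) 1).foldl
        (fun (mj : Int × Int) k =>
          if PySem.List.pyGetD s k 0 < mj.1 then (PySem.List.pyGetD s k 0, k) else mj)
        ((1000000000000 : Int), (0 : Int)) = (m, (i : Int) + (jr : Int)) := by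
      rw [inner_fold_eq s rem i hrem.symm, selAux_general, hmin]
      have hjr' : List.idxOf? m rem = some jr := by
        rw [PySem.List.index?_eq_idxOf?] at hjr; exact hjr
      simp [hmB, hjr']
    have hstep : reversortStep (s, cnt) (i : Int)
        = (pyReverse s (i : Int) ((i : Int) + (jr : Int)), cnt + ((jr : Int) + 1)) := by
      show (pyReverse s _ _, cnt + _) = _
      rw [hscan]
      simp only [Prod.mk.injEq]
      exact ⟨trivial, by ring⟩
    set s' := pyReverse s (i : Int) ((i : Int) + (jr : Int)) with hs'
    have hcast : ((i : Int) + (jr : Int)) = (((i + jr : Nat)) : Int) := by push_cast; ring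
    have hij : i ≤ i + jr := by omega
    have hjlt : i + jr < s.length := by
      have : rem.length = s.length - i := by simp [hrem]
      omega
    have hs'_eq : s' = s.take i ++ (rem.take (jr + 1)).reverse ++ s.drop (i + jr + 1) := by
      rw [hs', hcast, pyReverse_eq s i (i + jr) hij hjlt]
      have e1 : i + jr - i + 1 = jr + 1 := by omega
      have e2 : i + jr + 1 = i + jr + 1 := rfl
      rw [e1]
    have hrem_len : rem.length = s.length - i := by simp [hrem]
    have hlen' : s'.length = s.length := by
      rw [hs'_eq]
      simp only [List.length_append, List.length_take, List.length_reverse, List.length_drop]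
      omega
    have hb' : ∀ y ∈ s', y < 1000000000000 := by
      intro y hy
      rw [hs'_eq] at hy
      simp only [List.mem_append, List.mem_reverse] at hy
      rcases hy with (hy | hy) | hy
      · exact hb y (List.mem_of_mem_take hy)
      · exact hb y (List.mem_of_mem_drop (List.mem_of_mem_take hy))
      · exact hb y (List.mem_of_mem_drop hy)
    have htake : rem.take (jr + 1) = rem.take jr ++ [rem[jr]] := by
      rw [List.take_add_one]
      simp [List.getElem?_eq_getElem hjr_lt]
    have hdrop' : s'.drop (i + 1) = (rem.take jr).reverse ++ rem.drop (jr + 1) := by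
      rw [hs'_eq, List.append_assoc]
      have hlti : (s.take i).length = i := by simp; omega
      have h5 : (s.take i ++ ((rem.take (jr + 1)).reverse ++ s.drop (i + jr + 1))).drop (i + 1)
          = ((rem.take (jr + 1)).reverse ++ s.drop (i + jr + 1)).drop 1 := by
        have h6 := List.drop_length_add_append (l₁ := s.take i)
          (l₂ := (rem.take (jr + 1)).reverse ++ s.drop (i + jr + 1)) 1
        rw [hlti] at h6
        exact h6
      have h7 : rem.drop (jr + 1) = s.drop (i + jr + 1) := by
        have h8 : i + (jr + 1) = i + jr + 1 := by omega
        rw [hrem, List.drop_drop, h8]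
      rw [h5, htake, ← h7]
      simp only [List.reverse_append, List.reverse_singleton,
        List.cons_append, List.drop_succ_cons, List.drop_zero, List.nil_append]
    have hlen'' : s'.length = (i + 1) + d + 1 := by omega
    have hrange : PySem.List.len s - 1 = PySem.List.len s' - 1 := by
      simp [PySem.List.len_eq, hlen']
    have hcast2 : ((i : Int) + 1) = (((i + 1 : Nat)) : Int) := by push_cast; ring
    rw [hstep, hrange, hcast2, ih s' (i + 1) (cnt + ((jr : Int) + 1)) hlen'' hb', hdrop']
    -- unfold B's step on rem
    rw [show reversortAltGo rem cnt
        = reversortAltGo ((rem.take jr).reverse ++ rem.drop (jr + 1)) (cnt + ((jr : Int) + 1)) from ?_]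
    rw [reversortAltGo]
    rw [dif_pos (by omega : 1 < rem.length)]
    simp only [hmin]
    split
    · rename_i heq
      rw [heq] at hjr
      exact absurd hjr (by simp)
    · rename_i j heq
      rw [heq] at hjr
      have hj2 : j = jr := Option.some.inj hjr
      subst hj2
      rfl

-- ===== VERDICT (by name: the statement is the Claim_ definition above) =====
theorem reversort_spec : Claim_equal_reversort := by
  unfold Claim_equal_reversort Spec_reversort
  intro s hdom
  have hb : ∀ y ∈ s, y < 1000000000000 := by
    intro y hy
    unfold Dom_reversort at hdom
    rw [List.all_eq_true] at hdom
    have := hdom y hy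
    unfold pvDomInt at this
    rw [decide_eq_true_iff] at this
    omega
  unfold reversort reversort_alt
  rcases s with _ | ⟨x, t⟩
  · rw [reversortAltGo]
    simp [PySem.List.pyRange_one_eq_nil]
  · have hlen : (x :: t).length = 0 + t.length + 1 := by simp
    have h := loop_eq t.length (x :: t) 0 0 hlen hb
    simpa using h
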